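-- pv_equiv track=rewrite | github.com/milsi96/advent-of-code-2023 | day_12/main.py | next_arrangement
-- ===== SOURCE A (Python) =====
-- from enum import StrEnum
-- import itertools
-- from typing import Generator, Optional
--
-- class Condition(StrEnum):
--     OPERATIONAL = '.'
--     DAMAGED = '#'
--     UNKNOWN = '?'
--
--     @staticmethod
--     def from_str(condition) -> 'Condition':
--         match condition:
--             case '?':
--                 return Condition.UNKNOWN
--             case '#':
--                 return Condition.DAMAGED
--             case '.':
--                 return Condition.OPERATIONAL
--             case _:
--                 error = f'This condition is not implemented, got {condition}'
--                 logger.error(error)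
--                 raise NotImplementedError(error)
--
--     def __str__(self) -> str:
--         return self.value
--
-- def next_arrangement(spring_conditions: list[Condition]) -> Generator:
--     possible_conditions = [Condition.DAMAGED, Condition.OPERATIONAL]
--     unknown_springs_indexes: list[int] = []
--     for i in range(len(spring_conditions)):
--         if spring_conditions[i] == Condition.UNKNOWN:
--             unknown_springs_indexes.append(i)
--
--     condition_combinations = list(
--         itertools.product(possible_conditions, repeat=len(unknown_springs_indexes))
--     )
--     for comb in condition_combinations:
--         index = 0
--         temp_conditions = spring_conditions.copy()
--         for i in unknown_springs_indexes:
--             temp_conditions[i] = comb[index]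
--             index += 1
--         yield temp_conditions
-- ===== SOURCE B (Python) =====
-- def next_arrangement(spring_conditions):
--     # Rank-unrank: the k-th arrangement is read directly off the bits of k
--     # (most significant bit = first '?', bit 0 = last '?'; '#' for 0, '.' for 1),
--     # instead of materialising the cartesian product and patching list copies.
--     unknown_count = sum(1 for cell in spring_conditions if cell == '?')
--     for k in range(2 ** unknown_count):
--         out = []
--         bit = unknown_count
--         for cell in spring_conditions:
--             if cell == '?':
--                 bit -= 1
--                 out.append('#' if not (k >> bit) & 1 else '.')
--             else:
--                 out.append(cell)
--         yield out
-- ===== Notes on version B (the rewrite author's own statement) =====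
-- stated objective: alternative
-- what changed: Replaces collecting unknown indexes, materialising the full itertools.product and patching a fresh list copy per combination by a rank-unrank scheme: the k-th arrangement (k in range(2**unknown_count)) is built in one pass directly from the bits of k ('#' for 0, '.' for 1, most significant bit = first '?'), which also needs only O(n) memory beyond the current output.
import Mathlib
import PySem

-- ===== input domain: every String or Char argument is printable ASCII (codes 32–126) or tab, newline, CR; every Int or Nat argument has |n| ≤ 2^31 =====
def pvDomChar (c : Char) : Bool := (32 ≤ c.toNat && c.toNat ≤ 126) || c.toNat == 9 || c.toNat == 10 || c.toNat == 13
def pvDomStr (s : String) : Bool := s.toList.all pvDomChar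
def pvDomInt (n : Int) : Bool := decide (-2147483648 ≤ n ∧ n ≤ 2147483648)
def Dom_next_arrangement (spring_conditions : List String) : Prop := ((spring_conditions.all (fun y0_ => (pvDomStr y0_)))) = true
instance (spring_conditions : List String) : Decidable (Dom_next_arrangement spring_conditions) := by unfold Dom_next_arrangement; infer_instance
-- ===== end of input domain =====

-- B builds the k-th arrangement directly from the bits of k (rank-unrank) instead of
-- materialising the itertools.product of all unknown positions and patching list copies;
-- the generators' yields are collected in order as a list; Condition values are modelled
-- by their string values.

-- ===== PORT A =====
-- hand port of list(itertools.product(pool, repeat=n)) (no PySem primitive): exact order,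
-- leftmost component varies slowest
def pvProduct (pool : List String) : Nat → List (List String)
  | 0 => [[]]
  | n + 1 => pool.flatMap (fun v => (pvProduct pool n).map (fun t => v :: t))

-- for i in range(len(..)): if ..[i] == Condition.UNKNOWN: append i
-- (index i comes from range(len), always in range: the total pyGetD form is exact here)
def pvUnknownIdxs (spring_conditions : List String) : List Int :=
  (PySem.List.pyRange 0 (spring_conditions.length : Int) 1).foldl
    (fun acc i => if PySem.List.pyGetD spring_conditions i "" == "?" then acc ++ [i] else acc) []

-- loop body: temp_conditions[i] = comb[index]; index += 1  (both indices always in range,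
-- so the total pySetD/pyGetD forms are exact here)
def pvStep (comb : List String) (st : List String × Int) (i : Int) : List String × Int :=
  (PySem.List.pySetD st.1 i (PySem.List.pyGetD comb st.2 ""), st.2 + 1)

-- index = 0; temp_conditions = spring_conditions.copy(); for i in unknown_springs_indexes: …
def pvApply (spring_conditions : List String) (idxs : List Int) (comb : List String) : List String :=
  (idxs.foldl (pvStep comb) (spring_conditions, 0)).1

def next_arrangement (spring_conditions : List String) : List (List String) :=
  (pvProduct ["#", "."] (pvUnknownIdxs spring_conditions).length).foldl
    (fun out comb => out ++ [pvApply spring_conditions (pvUnknownIdxs spring_conditions) comb]) []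

-- ===== PORT B =====
-- unknown_count = sum(1 for cell in spring_conditions if cell == '?')
def pvUnknownCount (spring_conditions : List String) : Nat :=
  spring_conditions.foldl (fun acc cell => if cell == "?" then acc + 1 else acc) 0

-- inner loop body over (out, bit): bit -= 1; out.append('#' if not (k >> bit) & 1 else '.')
-- / out.append(cell)
def pvBuildStep (k : Nat) (st : List String × Nat) (cell : String) : List String × Nat :=
  if cell == "?" then
    (st.1 ++ [if ((k >>> (st.2 - 1)) &&& 1) == 0 then "#" else "."], st.2 - 1)
  else (st.1 ++ [cell], st.2)

-- for k in range(2 ** unknown_count): …  (k ranges over 0 .. 2^u - 1, all nonnegative, and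
-- bit counts down from u, never below 0 on this range: Nat arithmetic is exact here)
def next_arrangement_alt (spring_conditions : List String) : List (List String) :=
  (List.range (2 ^ pvUnknownCount spring_conditions)).foldl
    (fun acc k =>
      acc ++ [(spring_conditions.foldl (pvBuildStep k) ([], pvUnknownCount spring_conditions)).1]) []

-- ===== PRECONDITION & SPEC =====
def Spec_next_arrangement (spring_conditions : List String) (out : List (List String)) : Prop := out = next_arrangement_alt spring_conditions
instance (spring_conditions : List String) (out : List (List String)) : Decidable (Spec_next_arrangement spring_conditions out) := by unfold Spec_next_arrangement; infer_instance

-- ===== CLAIM (what is proved, stated in full; the proofs are below) =====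
def Claim_equal_next_arrangement : Prop := ∀ (spring_conditions : List String), Dom_next_arrangement spring_conditions → Spec_next_arrangement spring_conditions (next_arrangement spring_conditions)

-- ===== LEMMAS AND PROOFS =====

-- common reference form of the result: cons recursion over the cells, '#' before '.'
def pvSpec : List String → List (List String)
  | [] => [[]]
  | cell :: rest =>
      (if cell == "?" then ["#", "."] else [cell]).flatMap
        (fun option => (pvSpec rest).map (fun tail => option :: tail))

-- ---- A-side: next_arrangement = pvSpec ----

-- the index-collecting loop is filter over range
theorem pvUnknownIdxs_char (xs : List String) :
    pvUnknownIdxs xs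
      = ((List.range xs.length).filter (fun n => xs.getD n "" == "?")).map (fun (n : Nat) => (n : Int)) := by
  unfold pvUnknownIdxs
  rw [PySem.List.pyRange_zero_natCast, PySem.List.foldl_append_if_eq_filter]
  simp [List.filter_map, Function.comp_def, PySem.List.pyGetD_natCast]

theorem pvUnknownIdxs_nonneg (xs : List String) : ∀ i ∈ pvUnknownIdxs xs, 0 ≤ i := by
  intro i hi
  rw [pvUnknownIdxs_char] at hi
  simp only [List.mem_map] at hi
  obtain ⟨n, -, rfl⟩ := hi
  exact Int.natCast_nonneg n

theorem pvUnknownIdxs_cons (c : String) (rest : List String) :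
    pvUnknownIdxs (c :: rest)
      = (if c == "?" then [(0 : Int)] else []) ++ (pvUnknownIdxs rest).map (· + 1) := by
  rw [pvUnknownIdxs_char, pvUnknownIdxs_char]
  simp only [List.length_cons, List.range_succ_eq_map, List.filter_cons, List.filter_map,
    List.map_map, List.getD_cons_zero]
  by_cases h : c == "?" <;>
    simp [h, Function.comp_def]

-- known cell: shifting every index by one walks past the head unchanged
theorem pv_foldl_shift_known (comb : List String) :
    ∀ (is : List Int), (∀ i ∈ is, 0 ≤ i) → ∀ (a : String) (t : List String) (k : Int),
      (is.map (· + 1)).foldl (pvStep comb) (a :: t, k)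
        = (a :: (is.foldl (pvStep comb) (t, k)).1, (is.foldl (pvStep comb) (t, k)).2) := by
  intro is
  induction is with
  | nil => intro _ a t k; simp
  | cons i is ih =>
      intro h a t k
      have hi : 0 ≤ i := h i (List.mem_cons_self ..)
      have hstep : pvStep comb (a :: t, k) (i + 1)
          = (a :: PySem.List.pySetD t i (PySem.List.pyGetD comb k ""), k + 1) := by
        simp only [pvStep]
        rw [PySem.List.pySetD_of_nonneg _ _ (by omega), PySem.List.pySetD_of_nonneg _ _ hi]
        have : (i + 1).toNat = i.toNat + 1 := by omega
        simp [this]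
      simp only [List.map_cons, List.foldl_cons, hstep]
      exact ih (fun j hj => h j (List.mem_cons_of_mem _ hj)) a _ (k + 1)

-- unknown cell: after consuming the head of the combination, shifted indices and a
-- shifted read position walk past the new head unchanged
theorem pv_foldl_shift_unknown (v : String) (vs : List String) :
    ∀ (is : List Int), (∀ i ∈ is, 0 ≤ i) → ∀ (a : String) (t : List String) (k : Int), 0 ≤ k →
      (is.map (· + 1)).foldl (pvStep (v :: vs)) (a :: t, k + 1)
        = (a :: (is.foldl (pvStep vs) (t, k)).1, (is.foldl (pvStep vs) (t, k)).2 + 1) := by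
  intro is
  induction is with
  | nil => intro _ a t k _; simp
  | cons i is ih =>
      intro h a t k hk
      have hi : 0 ≤ i := h i (List.mem_cons_self ..)
      have hget : PySem.List.pyGetD (v :: vs) (k + 1) "" = PySem.List.pyGetD vs k "" := by
        rw [PySem.List.pyGetD_of_nonneg _ _ (by omega), PySem.List.pyGetD_of_nonneg _ _ hk]
        have : (k + 1).toNat = k.toNat + 1 := by omega
        simp [this]
      have hstep : pvStep (v :: vs) (a :: t, k + 1) (i + 1)
          = (a :: PySem.List.pySetD t i (PySem.List.pyGetD vs k ""), (k + 1) + 1) := by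
        simp only [pvStep, hget]
        rw [PySem.List.pySetD_of_nonneg _ _ (by omega), PySem.List.pySetD_of_nonneg _ _ hi]
        have : (i + 1).toNat = i.toNat + 1 := by omega
        simp [this]
      simp only [List.map_cons, List.foldl_cons, hstep]
      exact ih (fun j hj => h j (List.mem_cons_of_mem _ hj)) a _ (k + 1) (by omega)

theorem pv_key_a : ∀ xs : List String, next_arrangement xs = pvSpec xs := by
  intro xs
  induction xs with
  | nil => decide
  | cons c rest ih =>
      unfold next_arrangement at ih ⊢
      rw [PySem.List.foldl_append_singleton_eq_map] at ih ⊢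
      simp only [List.nil_append] at ih ⊢
      rw [pvUnknownIdxs_cons]
      have hnn := pvUnknownIdxs_nonneg rest
      by_cases h : c == "?"
      · simp only [h, if_pos]
        have hlen : ([(0 : Int)] ++ (pvUnknownIdxs rest).map (· + 1)).length
            = (pvUnknownIdxs rest).length + 1 := by simp
        rw [hlen]
        show (["#", "."].flatMap fun v => (pvProduct ["#", "."] (pvUnknownIdxs rest).length).map (v :: ·)).map _
            = pvSpec (c :: rest)
        rw [List.map_flatMap]
        have happ : ∀ (v : String) (vs : List String),
            pvApply (c :: rest) ([(0 : Int)] ++ (pvUnknownIdxs rest).map (· + 1)) (v :: vs)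
              = v :: pvApply rest (pvUnknownIdxs rest) vs := by
          intro v vs
          unfold pvApply
          simp only [List.singleton_append, List.foldl_cons]
          have hfirst : pvStep (v :: vs) (c :: rest, 0) 0 = (v :: rest, 0 + 1) := by
            simp [pvStep, PySem.List.pySetD_of_nonneg _ _ (le_refl (0 : Int)),
              PySem.List.pyGetD_of_nonneg _ _ (le_refl (0 : Int))]
          rw [hfirst, pv_foldl_shift_unknown v vs _ hnn _ _ 0 (le_refl _)]
        have hmap : ∀ v : String,
            ((pvProduct ["#", "."] (pvUnknownIdxs rest).length).map (v :: ·)).map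
              (pvApply (c :: rest) ([(0 : Int)] ++ (pvUnknownIdxs rest).map (· + 1)))
              = (pvSpec rest).map (v :: ·) := by
          intro v
          rw [List.map_map, ← ih, List.map_map]
          exact List.map_congr_left (fun vs _ => happ v vs)
        show (["#", "."].flatMap fun v =>
            ((pvProduct ["#", "."] (pvUnknownIdxs rest).length).map (v :: ·)).map _)
            = pvSpec (c :: rest)
        conv_rhs => rw [pvSpec]
        simp only [h, if_pos]
        exact List.flatMap_congr (fun v _ => hmap v)
      · simp only [h, if_neg, Bool.false_eq_true, not_false_iff, List.nil_append, List.length_map]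
        have happ : ∀ vs : List String,
            pvApply (c :: rest) ((pvUnknownIdxs rest).map (· + 1)) vs
              = c :: pvApply rest (pvUnknownIdxs rest) vs := by
          intro vs
          unfold pvApply
          rw [pv_foldl_shift_known vs _ hnn c rest 0]
        conv_rhs => rw [pvSpec]
        simp only [h, if_neg, Bool.false_eq_true, not_false_iff, List.flatMap_cons,
          List.flatMap_nil, List.append_nil]
        rw [← ih, List.map_map]
        exact List.map_congr_left (fun vs _ => happ vs)

-- ---- B-side: next_arrangement_alt = pvSpec ----

-- cons form of B's inner building loop
def pvBuildRec (k : Nat) : List String → Nat → List String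
  | [], _ => []
  | cell :: rest, bit =>
      if cell == "?" then
        (if ((k >>> (bit - 1)) &&& 1) == 0 then "#" else ".") :: pvBuildRec k rest (bit - 1)
      else cell :: pvBuildRec k rest bit

theorem pvBuild_fold (k : Nat) :
    ∀ (xs : List String) (acc : List String) (bit : Nat),
      (xs.foldl (pvBuildStep k) (acc, bit)).1 = acc ++ pvBuildRec k xs bit := by
  intro xs
  induction xs with
  | nil => intro acc bit; simp [pvBuildRec]
  | cons c rest ih =>
      intro acc bit
      by_cases h : c == "?" <;>
        simp [pvBuildStep, pvBuildRec, h, ih]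

theorem pv_foldl_count (l : List String) :
    ∀ a : Nat, l.foldl (fun acc cell => if cell == "?" then acc + 1 else acc) a
      = a + l.countP (fun cell => cell == "?") := by
  induction l with
  | nil => intro a; simp
  | cons c rest ih =>
      intro a
      simp only [List.foldl_cons]
      rw [ih]
      by_cases h : c == "?"
      · simp [h]
        omega
      · simp [h]

theorem pvUnknownCount_eq (xs : List String) :
    pvUnknownCount xs = xs.countP (fun cell => cell == "?") := by
  unfold pvUnknownCount
  rw [pv_foldl_count]
  simp

-- the test '(k >> b) & 1 == 0' is testBit
theorem pvSym_eq (k b : Nat) : (((k >>> b) &&& 1) == 0) = !(Nat.testBit k b) := by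
  simp only [Nat.testBit, Nat.and_comm]
  rcases Nat.mod_two_eq_zero_or_one (k >>> b) with h | h <;> simp [Nat.and_one_is_mod, h]

-- the built arrangement reads only the bits below `bit` of k
theorem pvBuildRec_congr :
    ∀ (rest : List String) (bit : Nat) (k k' : Nat),
      rest.countP (fun cell => cell == "?") ≤ bit →
      (∀ b, b < bit → Nat.testBit k b = Nat.testBit k' b) →
      pvBuildRec k rest bit = pvBuildRec k' rest bit := by
  intro rest
  induction rest with
  | nil => intro bit k k' _ _; rfl
  | cons c rest ih =>
      intro bit k k' hle hbits
      by_cases h : c == "?"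
      · have hcount : rest.countP (fun cell => cell == "?") + 1 ≤ bit := by
          simpa [List.countP_cons, h] using hle
        have hbit : 1 ≤ bit := by omega
        simp only [pvBuildRec, h, if_pos, pvSym_eq]
        rw [hbits (bit - 1) (by omega),
          ih (bit - 1) k k' (by omega) (fun b hb => hbits b (by omega))]
      · have hcount : rest.countP (fun cell => cell == "?") ≤ bit := by
          simpa [List.countP_cons, h] using hle
        simp only [pvBuildRec, h, if_neg, Bool.false_eq_true, not_false_iff]
        rw [ih bit k k' hcount hbits]

theorem pv_key_b_main :
    ∀ xs : List String,
      (List.range (2 ^ xs.countP (fun cell => cell == "?"))).map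
          (fun k => pvBuildRec k xs (xs.countP (fun cell => cell == "?")))
        = pvSpec xs := by
  intro xs
  induction xs with
  | nil => decide
  | cons c rest ih =>
      by_cases h : c == "?"
      · have hcount : (c :: rest).countP (fun cell => cell == "?")
            = rest.countP (fun cell => cell == "?") + 1 := by
          simp [h]
        set u := rest.countP (fun cell => cell == "?") with hu
        rw [hcount, pow_succ, mul_two, List.range_add, List.map_append, List.map_map]
        have hfirst :
            (List.range (2 ^ u)).map (fun k => pvBuildRec k (c :: rest) (u + 1))
              = ((List.range (2 ^ u)).map (fun k => pvBuildRec k rest u)).map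
                  (fun tail => "#" :: tail) := by
          rw [List.map_map]
          refine List.map_congr_left (fun k hk => ?_)
          have hklt : k < 2 ^ u := List.mem_range.mp hk
          have hsym : (((k >>> u) &&& 1) == 0) = true := by
            rw [pvSym_eq, Nat.testBit_lt_two_pow hklt]
            rfl
          simp only [pvBuildRec, h, if_pos, Nat.add_sub_cancel, hsym]
          simp
        have hsecond :
            (List.range (2 ^ u)).map
                ((fun k => pvBuildRec k (c :: rest) (u + 1)) ∘ (fun j => 2 ^ u + j))
              = ((List.range (2 ^ u)).map (fun k => pvBuildRec k rest u)).map
                  (fun tail => "." :: tail) := by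
          rw [List.map_map]
          refine List.map_congr_left (fun j hj => ?_)
          have hjlt : j < 2 ^ u := List.mem_range.mp hj
          have hsym : (((2 ^ u + j) >>> u &&& 1) == 0) = false := by
            rw [pvSym_eq, Nat.testBit_two_pow_add_eq, Nat.testBit_lt_two_pow hjlt]
            rfl
          have htail : pvBuildRec (2 ^ u + j) rest u = pvBuildRec j rest u :=
            pvBuildRec_congr rest u (2 ^ u + j) j (le_refl _)
              (fun b hb => Nat.testBit_two_pow_add_gt hb j)
          simp only [Function.comp_def, pvBuildRec, h, if_pos, Nat.add_sub_cancel, hsym, htail]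
          simp
        rw [hfirst, hsecond, ih]
        conv_rhs => rw [pvSpec]
        simp [h]
      · have hcount : (c :: rest).countP (fun cell => cell == "?")
            = rest.countP (fun cell => cell == "?") := by
          simp [h]
        rw [hcount]
        have hstep :
            (List.range (2 ^ rest.countP (fun cell => cell == "?"))).map
                (fun k => pvBuildRec k (c :: rest) (rest.countP (fun cell => cell == "?")))
              = ((List.range (2 ^ rest.countP (fun cell => cell == "?"))).map
                  (fun k => pvBuildRec k rest (rest.countP (fun cell => cell == "?")))).map
                  (fun tail => c :: tail) := by
          rw [List.map_map]
          refine List.map_congr_left (fun k _ => ?_)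
          simp [pvBuildRec, h]
        rw [hstep, ih]
        conv_rhs => rw [pvSpec]
        simp [h]

theorem pv_key_b : ∀ xs : List String, next_arrangement_alt xs = pvSpec xs := by
  intro xs
  unfold next_arrangement_alt
  rw [PySem.List.foldl_append_singleton_eq_map, List.nil_append]
  simp only [pvUnknownCount_eq]
  rw [← pv_key_b_main xs]
  exact List.map_congr_left (fun k _ => by rw [pvBuild_fold, List.nil_append])

-- ===== VERDICT (by name: the statement is the Claim_ definition above) =====
theorem next_arrangement_spec : Claim_equal_next_arrangement := by
  intro xs _
  show next_arrangement xs = next_arrangement_alt xs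
  rw [pv_key_a, pv_key_b]
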